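-- pv_equiv track=rewrite | github.com/unknownboyy/GUVI | parser.py | check
-- ===== SOURCE A (Python) =====
-- def check(symbol,production,grammar):
--     if containsNull(production):
--         return True
--     else:
--         if not isNonTerminal(production[0]):
--             if symbol == production[0]:
--                 return True
--             else:
--                 return False
--         else:
--             for p in grammar[production[0]]:
--                 if check(symbol,p,grammar):
--                     return True
--             return False
--
-- def containsNull(p):
--     return "." in p
--
-- def isNonTerminal(s):
--     return ord(s)>=65 and ord(s)<=90
-- ===== SOURCE B (Python) =====
-- # Iterative depth-first search with an explicit stack instead of recursion.
-- def check(symbol, production, grammar):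
--     stack = [production]
--     while stack:
--         p = stack.pop()
--         if "." in p:
--             return True
--         c = p[0]
--         if not (65 <= ord(c) <= 90):
--             if symbol == c:
--                 return True
--         else:
--             stack.extend(reversed(grammar[c]))
--     return False
-- ===== Notes on version B (the rewrite author's own statement) =====
-- stated objective: alternative
-- what changed: Replaces the recursive depth-first search with an iterative one over an explicit stack of pending production strings, pushing a nonterminal's productions in reverse so the exploration order is unchanged.
-- outside the precondition, e.g. on check('a', 'a', {'S': ['S']}): A returns True, B returns True; on check('a', 'a', {'S': ['']}): A returns True, B returns True; on check('a', 'a', {'S': ['T']}): A returns True, B returns True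
import Mathlib
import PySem

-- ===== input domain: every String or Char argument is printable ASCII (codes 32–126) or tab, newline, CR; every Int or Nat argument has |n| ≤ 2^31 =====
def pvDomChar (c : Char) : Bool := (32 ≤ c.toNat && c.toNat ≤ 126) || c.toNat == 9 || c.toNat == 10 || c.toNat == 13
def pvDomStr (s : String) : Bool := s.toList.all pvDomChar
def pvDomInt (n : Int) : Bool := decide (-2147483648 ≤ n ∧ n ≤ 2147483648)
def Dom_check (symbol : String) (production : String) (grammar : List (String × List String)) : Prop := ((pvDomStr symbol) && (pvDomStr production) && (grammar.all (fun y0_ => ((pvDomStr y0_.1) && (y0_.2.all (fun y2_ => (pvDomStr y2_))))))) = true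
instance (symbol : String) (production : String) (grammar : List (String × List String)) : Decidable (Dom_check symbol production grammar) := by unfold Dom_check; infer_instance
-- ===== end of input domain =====

-- B rewrites A's recursive depth-first search as an iterative search over an explicit stack
-- (same exploration order); objective: alternative, not faster.

-- ===== PORT A =====
-- grammar[k]: first-match lookup in the association list (Python dict)
def lookupG (grammar : List (String × List String)) (k : String) : Option (List String) :=
  match grammar with
  | [] => none
  | (a, v) :: rest => if a == k then some v else lookupG rest k

def containsNull (p : String) : Bool := p.toList.contains '.'

def isNonTerminal (c : Char) : Bool := 65 ≤ c.toNat && c.toNat ≤ 90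

-- A's recursion is not structurally decreasing (Python dies with RecursionError on cyclic
-- grammars, which Pre_check excludes), so the port carries a fuel parameter; inside Pre_check
-- the recursion depth is at most grammar.length + 3, so the fuel is never exhausted there.
def checkFuel : Nat → String → String → List (String × List String) → Bool
  | 0, _, _, _ => false
  | fuel + 1, symbol, production, grammar =>
    if containsNull production then true
    else
      match production.toList with
      | [] => false  -- Python: IndexError on production[0]; excluded by Pre_check
      | c :: _ =>
        if !(isNonTerminal c) then
          symbol == String.singleton c
        else
          match lookupG grammar (String.singleton c) with
          | none => false  -- Python: KeyError; excluded by Pre_check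
          | some ps => ps.any (fun p => checkFuel fuel symbol p grammar)

def check (symbol : String) (production : String) (grammar : List (String × List String)) : Bool :=
  checkFuel (grammar.length + 3) symbol production grammar

-- ===== PORT B =====
-- stack.extend(reversed(grammar[c])) followed by pop-from-the-end ≡ ps ++ rest with head = top.
-- B's loop is also unbounded on cyclic grammars, so the port carries fuel: one unit per pop;
-- inside Pre_check the number of pops is bounded by bFuel grammar (grammar.length + 2).
def gsize (grammar : List (String × List String)) : Nat :=
  grammar.foldl (fun a kv => a + kv.2.length) 0

def bFuel (grammar : List (String × List String)) : Nat → Nat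
  | 0 => 1
  | t + 1 => 1 + gsize grammar * bFuel grammar t

def checkStack : Nat → String → List String → List (String × List String) → Bool
  | 0, _, _, _ => false
  | fuel + 1, symbol, stack, grammar =>
    match stack with
    | [] => false
    | p :: rest =>
      if p.toList.contains '.' then true
      else
        match p.toList with
        | [] => false  -- Python: IndexError on p[0]; excluded by Pre_check
        | c :: _ =>
          if !(65 ≤ c.toNat && c.toNat ≤ 90) then
            if symbol == String.singleton c then true
            else checkStack fuel symbol rest grammar
          else
            match lookupG grammar (String.singleton c) with
            | none => false  -- Python: KeyError; excluded by Pre_check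
            | some ps => checkStack fuel symbol (ps ++ rest) grammar

def check_alt (symbol : String) (production : String) (grammar : List (String × List String)) : Bool :=
  checkStack (bFuel grammar (grammar.length + 2)) symbol [production] grammar

-- ===== PRECONDITION & SPEC =====
-- okProd p: evaluating A on p cannot raise at p itself: p contains '.', or is nonempty and
-- starts with a terminal, or starts with a nonterminal that has a grammar entry.
def okProd (grammar : List (String × List String)) (p : String) : Bool :=
  p.toList.contains '.' ||
    (match p.toList with
     | [] => false
     | c :: _ =>
       if 65 ≤ c.toNat && c.toNat ≤ 90 then (grammar.lookup (String.singleton c)).isSome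
       else true)

-- succs k: the nonterminal keys the key k recurses into (first chars of its dot-free productions)
def succs (grammar : List (String × List String)) (k : String) : List String :=
  match grammar.lookup k with
  | none => []
  | some ps =>
    ps.filterMap (fun p =>
      if p.toList.contains '.' then none
      else
        match p.toList with
        | [] => none
        | c :: _ => if 65 ≤ c.toNat && c.toNat ≤ 90 then some (String.singleton c) else none)

-- dRank i k: length of the longest chain of expansions from key k, truncated at i
def dRank (grammar : List (String × List String)) : Nat → String → Nat
  | 0, _ => 0
  | i + 1, k => (succs grammar k).foldr (fun k' a => max (1 + dRank grammar i k') a) 0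

-- Pre_check excludes exactly the inputs on which the Python A raises: an empty dot-free
-- production string (IndexError on p[0]), a dot-free production starting with a nonterminal
-- that has no grammar entry (KeyError), and grammars whose expansion graph has a cycle, on
-- which A's recursion is unbounded (RecursionError); the conditions are checked on every
-- grammar entry, so they conservatively also exclude inputs whose only defect lies in an
-- entry the search never reaches (examples cited in claim.json).
def Pre_check (symbol : String) (production : String) (grammar : List (String × List String)) : Prop :=
  (okProd grammar production
    && grammar.all (fun kv => kv.2.all (okProd grammar))
    && grammar.all (fun kv =>
         dRank grammar grammar.length kv.1 == dRank grammar (grammar.length + 1) kv.1)) = true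

instance (symbol : String) (production : String) (grammar : List (String × List String)) :
    Decidable (Pre_check symbol production grammar) := by unfold Pre_check; infer_instance

def pvWitness_check : String × String × (List (String × List String)) :=
  ("a", "S", [("S", ["Tb"]), ("T", ["a", "."])])

def Spec_check (symbol : String) (production : String) (grammar : List (String × List String)) (out : Bool) : Prop := out = check_alt symbol production grammar
instance (symbol : String) (production : String) (grammar : List (String × List String)) (out : Bool) : Decidable (Spec_check symbol production grammar out) := by unfold Spec_check; infer_instance

-- ===== CLAIM (what is proved, stated in full; the proofs are below) =====
def Claim_equal_check : Prop := ∀ (symbol : String) (production : String) (grammar : List (String × List String)), Dom_check symbol production grammar → Pre_check symbol production grammar → Spec_check symbol production grammar (check symbol production grammar)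

-- ===== LEMMAS AND PROOFS =====

-- shorthand predicates used only by the proofs
def flatB (p : String) : Bool :=
  p.toList.contains '.' ||
    (match p.toList with
     | [] => false
     | c :: _ => !(65 ≤ c.toNat && c.toNat ≤ 90))

def evalFlat (symbol : String) (p : String) : Bool :=
  p.toList.contains '.' ||
    (match p.toList with
     | [] => false
     | c :: _ => symbol == String.singleton c)

-- muP p: an upper bound on the recursion depth A needs below p (inside Pre_check)
def muP (grammar : List (String × List String)) (p : String) : Nat :=
  if flatB p then 1
  else
    match p.toList with
    | [] => 1
    | c :: _ => dRank grammar grammar.length (String.singleton c) + 2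

-- recVal: A's recursion evaluated with just enough fuel
def recVal (grammar : List (String × List String)) (symbol : String) (p : String) : Bool :=
  checkFuel (muP grammar p) symbol p grammar

-- treeCnt t p: size of A's search tree below p, truncated at depth t
def treeCnt (grammar : List (String × List String)) : Nat → String → Nat
  | 0, _ => 1
  | t + 1, p =>
    if flatB p then 1
    else
      match p.toList with
      | [] => 1
      | c :: _ =>
        match grammar.lookup (String.singleton c) with
        | none => 1
        | some ps => 1 + (ps.map (treeCnt grammar t)).sum

def sizeP (grammar : List (String × List String)) (p : String) : Nat :=
  treeCnt grammar (muP grammar p) p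

theorem lookupG_eq_lookup (grammar : List (String × List String)) (k : String) :
    lookupG grammar k = grammar.lookup k := by
  induction grammar with
  | nil => rfl
  | cons kv rest ih =>
    unfold lookupG
    rcases h : (k == kv.1) with _ | _
    · have h' : (kv.1 == k) = false := by
        simp only [beq_eq_false_iff_ne] at h ⊢
        exact fun e => h e.symm
      simp [List.lookup, h, h', ih]
    · have h' : (kv.1 == k) = true := by
        simp only [beq_iff_eq] at h ⊢
        exact h.symm
      simp [List.lookup, h, h']

theorem lookup_mem (grammar : List (String × List String)) (k : String) (v : List String)
    (h : grammar.lookup k = some v) : (k, v) ∈ grammar := by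
  induction grammar with
  | nil => simp [List.lookup] at h
  | cons kv rest ih =>
    rcases hk : (k == kv.1) with _ | _
    · simp [List.lookup, hk] at h
      exact List.mem_cons_of_mem _ (ih h)
    · simp [List.lookup, hk] at h
      have : kv = (k, v) := by
        obtain ⟨a, b⟩ := kv
        simp only [beq_iff_eq] at hk
        simp at h ⊢
        exact ⟨hk.symm, h⟩
      simp [this]

theorem foldr_max_ge (l : List String) (g : String → Nat) (x : String) (hx : x ∈ l) :
    g x ≤ l.foldr (fun y a => max (g y) a) 0 := by
  induction l with
  | nil => simp at hx
  | cons y ys ih =>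
    rcases List.mem_cons.mp hx with h | h
    · subst h; simp [List.foldr]
    · simp only [List.foldr]
      exact le_trans (ih h) (le_max_right _ _)

theorem foldr_max_le (l : List String) (g : String → Nat) (b : Nat)
    (h : ∀ x ∈ l, g x ≤ b) : l.foldr (fun y a => max (g y) a) 0 ≤ b := by
  induction l with
  | nil => simp
  | cons y ys ih =>
    simp only [List.foldr, max_le_iff]
    exact ⟨h y (by simp), ih (fun x hx => h x (by simp [hx]))⟩

theorem dRank_succ (grammar : List (String × List String)) (i : Nat) (k : String) :
    dRank grammar (i + 1) k
      = (succs grammar k).foldr (fun k' a => max (1 + dRank grammar i k') a) 0 := rfl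

theorem dRank_le (grammar : List (String × List String)) :
    ∀ (f : Nat) (k : String), dRank grammar f k ≤ f := by
  intro f
  induction f with
  | zero => intro k; simp [dRank]
  | succ i ih =>
    intro k
    rw [dRank_succ]
    exact foldr_max_le _ _ _ (fun x _ => by have := ih x; omega)

theorem dRank_none (grammar : List (String × List String)) (k : String)
    (h : grammar.lookup k = none) : ∀ f, dRank grammar f k = 0 := by
  intro f
  cases f with
  | zero => rfl
  | succ i =>
    rw [dRank_succ]
    unfold succs
    rw [h]
    rfl

theorem pre_hstab (grammar : List (String × List String))
    (h : grammar.all (fun kv =>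
          dRank grammar grammar.length kv.1 == dRank grammar (grammar.length + 1) kv.1) = true) :
    ∀ k, dRank grammar grammar.length k = dRank grammar (grammar.length + 1) k := by
  intro k
  cases hl : grammar.lookup k with
  | none => rw [dRank_none grammar k hl, dRank_none grammar k hl]
  | some ps =>
    have hm : (k, ps) ∈ grammar := lookup_mem grammar k ps hl
    have := List.all_eq_true.mp h _ hm
    simpa using this

theorem mem_succs (grammar : List (String × List String)) (k : String) (ps : List String)
    (p : String) (c : Char) (t : List Char)
    (hl : grammar.lookup k = some ps) (hp : p ∈ ps)
    (hdot : p.toList.contains '.' = false) (hc : p.toList = c :: t)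
    (hnt : (65 ≤ c.toNat && c.toNat ≤ 90) = true) :
    String.singleton c ∈ succs grammar k := by
  unfold succs
  rw [hl]
  rw [List.mem_filterMap]
  exact ⟨p, hp, by rw [hdot, hc]; simp [hnt]⟩

theorem rank_lt (grammar : List (String × List String))
    (hstab : ∀ k, dRank grammar grammar.length k = dRank grammar (grammar.length + 1) k)
    (k : String) (ps : List String) (p : String) (c : Char) (t : List Char)
    (hl : grammar.lookup k = some ps) (hp : p ∈ ps)
    (hdot : p.toList.contains '.' = false) (hc : p.toList = c :: t)
    (hnt : (65 ≤ c.toNat && c.toNat ≤ 90) = true) :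
    dRank grammar grammar.length (String.singleton c) < dRank grammar grammar.length k := by
  have hmem := mem_succs grammar k ps p c t hl hp hdot hc hnt
  have hge := foldr_max_ge (succs grammar k)
      (fun k' => 1 + dRank grammar grammar.length k') (String.singleton c) hmem
  rw [← dRank_succ, ← hstab k] at hge
  have hge' : 1 + dRank grammar grammar.length (String.singleton c)
      ≤ dRank grammar grammar.length k := hge
  omega

theorem muP_pos (grammar : List (String × List String)) (p : String) : 1 ≤ muP grammar p := by
  unfold muP
  split
  · exact le_refl 1
  · split <;> omega

-- structure of an ok, non-flat production: dot-free, nonterminal head with a grammar entry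
theorem nonflat_shape (grammar : List (String × List String)) (p : String)
    (hok : okProd grammar p = true) (hnf : flatB p = false) :
    p.toList.contains '.' = false ∧
      ∃ c t ps, p.toList = c :: t ∧ (65 ≤ c.toNat && c.toNat ≤ 90) = true ∧
        grammar.lookup (String.singleton c) = some ps := by
  unfold flatB at hnf
  unfold okProd at hok
  rcases hdot : p.toList.contains '.' with _ | _
  · rw [hdot] at hnf hok
    simp only [Bool.false_or] at hnf hok
    cases hc : p.toList with
    | nil => rw [hc] at hok; simp at hok
    | cons c t =>
      rw [hc] at hnf hok
      simp only at hnf hok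
      rcases hnt : (65 ≤ c.toNat && c.toNat ≤ 90) with _ | _
      · rw [hnt] at hnf; simp at hnf
      · rw [hnt] at hok
        simp only [if_true] at hok
        cases hl : grammar.lookup (String.singleton c) with
        | none => rw [hl] at hok; simp at hok
        | some ps => exact ⟨rfl, c, t, ps, rfl, hnt, hl⟩
  · rw [hdot] at hnf; simp at hnf

theorem checkFuel_succ (n : Nat) (symbol production : String)
    (grammar : List (String × List String)) :
    checkFuel (n + 1) symbol production grammar =
      (if containsNull production then true
       else
         match production.toList with
         | [] => false
         | c :: _ =>
           if !(isNonTerminal c) then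
             symbol == String.singleton c
           else
             match lookupG grammar (String.singleton c) with
             | none => false
             | some ps => ps.any (fun p => checkFuel n symbol p grammar)) := rfl

theorem checkStack_cons (n : Nat) (symbol p : String) (rest : List String)
    (grammar : List (String × List String)) :
    checkStack (n + 1) symbol (p :: rest) grammar =
      (if p.toList.contains '.' then true
       else
         match p.toList with
         | [] => false
         | c :: _ =>
           if !(65 ≤ c.toNat && c.toNat ≤ 90) then
             if symbol == String.singleton c then true
             else checkStack n symbol rest grammar
           else
             match lookupG grammar (String.singleton c) with
             | none => false
             | some ps => checkStack n symbol (ps ++ rest) grammar) := rfl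

theorem checkFuel_flat (symbol p : String) (grammar : List (String × List String)) (n : Nat)
    (h : flatB p = true) : checkFuel (n + 1) symbol p grammar = evalFlat symbol p := by
  rw [checkFuel_succ]
  unfold containsNull isNonTerminal evalFlat
  by_cases hcm : '.' ∈ p.toList
  · have hc : p.toList.contains '.' = true := by simpa using hcm
    rw [hc]
    simp
  · have hc : p.toList.contains '.' = false := by simpa using hcm
    rw [hc]
    unfold flatB at h
    rw [hc] at h
    simp only [Bool.false_or] at h
    simp only [Bool.false_eq_true, if_false]
    cases hl : p.toList with
    | nil => rw [hl] at h; simp at h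
    | cons c t =>
      rw [hl] at h
      simp only at h
      simp [h]

theorem any_congr_mem {α : Type} (l : List α) (f g : α → Bool)
    (h : ∀ a ∈ l, f a = g a) : l.any f = l.any g := by
  induction l with
  | nil => rfl
  | cons x xs ih => simp [List.any, h x (by simp), ih (fun a ha => h a (by simp [ha]))]

-- unfolding checkFuel at an ok non-flat production
theorem checkFuel_nonflat (symbol p : String) (grammar : List (String × List String))
    (n : Nat) (c : Char) (t : List Char) (ps : List String)
    (hdot : p.toList.contains '.' = false) (hc : p.toList = c :: t)
    (hnt : (65 ≤ c.toNat && c.toNat ≤ 90) = true)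
    (hl : grammar.lookup (String.singleton c) = some ps) :
    checkFuel (n + 1) symbol p grammar = ps.any (fun q => checkFuel n symbol q grammar) := by
  rw [checkFuel_succ]
  unfold containsNull isNonTerminal
  rw [hdot]
  simp only [Bool.false_eq_true, if_false, hc]
  rw [hnt]
  simp only [Bool.not_true, Bool.false_eq_true, if_false]
  rw [lookupG_eq_lookup, hl]

-- okProd holds for every production of every entry, given the Pre_check conjunct
theorem all_ok_mem (grammar : List (String × List String))
    (h : grammar.all (fun kv => kv.2.all (okProd grammar)) = true)
    (k : String) (ps : List String) (hl : grammar.lookup k = some ps) :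
    ∀ q ∈ ps, okProd grammar q = true := by
  intro q hq
  have hm : (k, ps) ∈ grammar := lookup_mem grammar k ps hl
  have := List.all_eq_true.mp h _ hm
  exact List.all_eq_true.mp this q hq

-- the depth bound strictly decreases from an ok non-flat production to its children
theorem mu_lt (grammar : List (String × List String))
    (hstab : ∀ k, dRank grammar grammar.length k = dRank grammar (grammar.length + 1) k)
    (p : String) (c : Char) (t : List Char) (ps : List String) (q : String)
    (hc : p.toList = c :: t) (hnf : flatB p = false)
    (hl : grammar.lookup (String.singleton c) = some ps) (hq : q ∈ ps)
    (hokq : okProd grammar q = true) :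
    muP grammar q < muP grammar p := by
  have hpmu : muP grammar p = dRank grammar grammar.length (String.singleton c) + 2 := by
    unfold muP
    rw [hnf, hc]
    simp
  rcases hfq : flatB q with _ | _
  · -- q non-flat: rank of q's head is strictly below rank of (singleton c)
    obtain ⟨hdotq, c', t', ps', hcq, hntq, _⟩ := nonflat_shape grammar q hokq hfq
    have hqmu : muP grammar q = dRank grammar grammar.length (String.singleton c') + 2 := by
      unfold muP
      rw [hfq, hcq]
      simp
    have := rank_lt grammar hstab (String.singleton c) ps q c' t' hl hq hdotq hcq hntq
    omega
  · have hqmu : muP grammar q = 1 := by unfold muP; rw [hfq]; simp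
    omega

-- fuel-indifference of A's recursion above the depth bound
theorem checkFuel_stable (grammar : List (String × List String)) (symbol : String)
    (hstab : ∀ k, dRank grammar grammar.length k = dRank grammar (grammar.length + 1) k)
    (hall : grammar.all (fun kv => kv.2.all (okProd grammar)) = true) :
    ∀ (t : Nat) (p : String), okProd grammar p = true → muP grammar p ≤ t →
      ∀ n m, muP grammar p ≤ n → muP grammar p ≤ m →
        checkFuel n symbol p grammar = checkFuel m symbol p grammar := by
  intro t
  induction t with
  | zero => intro p _ hmt; have := muP_pos grammar p; omega
  | succ t ih =>
    intro p hok hmt n m hn hm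
    have hp1 := muP_pos grammar p
    obtain ⟨n', rfl⟩ : ∃ n', n = n' + 1 := ⟨n - 1, by omega⟩
    obtain ⟨m', rfl⟩ : ∃ m', m = m' + 1 := ⟨m - 1, by omega⟩
    rcases hf : flatB p with _ | _
    · -- non-flat head: both sides unfold to any over the same productions
      obtain ⟨hdot, c, tl, ps, hc, hnt, hl⟩ := nonflat_shape grammar p hok hf
      rw [checkFuel_nonflat symbol p grammar n' c tl ps hdot hc hnt hl,
          checkFuel_nonflat symbol p grammar m' c tl ps hdot hc hnt hl]
      apply any_congr_mem
      intro q hq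
      have hokq := all_ok_mem grammar hall _ ps hl q hq
      have hlt := mu_lt grammar hstab p c tl ps q hc hf hl hq hokq
      have hmp : muP grammar p = dRank grammar grammar.length (String.singleton c) + 2 := by
        unfold muP; rw [hf, hc]; simp
      exact ih q hokq (by omega) n' m' (by omega) (by omega)
    · rw [checkFuel_flat symbol p grammar n' hf, checkFuel_flat symbol p grammar m' hf]

theorem recVal_flat (grammar : List (String × List String)) (symbol p : String)
    (hf : flatB p = true) : recVal grammar symbol p = evalFlat symbol p := by
  unfold recVal muP
  rw [hf]
  simp only [if_true]
  exact checkFuel_flat symbol p grammar 0 hf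

theorem recVal_nonflat (grammar : List (String × List String)) (symbol : String)
    (hstab : ∀ k, dRank grammar grammar.length k = dRank grammar (grammar.length + 1) k)
    (hall : grammar.all (fun kv => kv.2.all (okProd grammar)) = true)
    (p : String) (c : Char) (t : List Char) (ps : List String)
    (hok : okProd grammar p = true) (hnf : flatB p = false)
    (hdot : p.toList.contains '.' = false) (hc : p.toList = c :: t)
    (hnt : (65 ≤ c.toNat && c.toNat ≤ 90) = true)
    (hl : grammar.lookup (String.singleton c) = some ps) :
    recVal grammar symbol p = ps.any (recVal grammar symbol) := by
  have hmp : muP grammar p = dRank grammar grammar.length (String.singleton c) + 2 := by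
    unfold muP; rw [hnf, hc]; simp
  unfold recVal
  rw [hmp, checkFuel_nonflat symbol p grammar _ c t ps hdot hc hnt hl]
  apply any_congr_mem
  intro q hq
  have hokq := all_ok_mem grammar hall _ ps hl q hq
  have hlt := mu_lt grammar hstab p c t ps q hc hnf hl hq hokq
  exact checkFuel_stable grammar symbol hstab hall (muP grammar q) q hokq (le_refl _)
    _ _ (by omega) (le_refl _)

theorem treeCnt_succ (grammar : List (String × List String)) (t : Nat) (p : String) :
    treeCnt grammar (t + 1) p =
      (if flatB p then 1
       else
         match p.toList with
         | [] => 1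
         | c :: _ =>
           match grammar.lookup (String.singleton c) with
           | none => 1
           | some ps => 1 + (ps.map (treeCnt grammar t)).sum) := rfl

theorem treeCnt_pos (grammar : List (String × List String)) :
    ∀ (t : Nat) (p : String), 1 ≤ treeCnt grammar t p := by
  intro t p
  cases t with
  | zero => simp [treeCnt]
  | succ t =>
    rw [treeCnt_succ]
    split
    · omega
    · split
      · omega
      · split <;> omega

theorem treeCnt_flat (grammar : List (String × List String)) (t : Nat) (p : String)
    (hf : flatB p = true) : treeCnt grammar (t + 1) p = 1 := by
  rw [treeCnt_succ, hf]
  simp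

theorem treeCnt_nonflat (grammar : List (String × List String)) (t : Nat) (p : String)
    (c : Char) (tl : List Char) (ps : List String)
    (hnf : flatB p = false) (hc : p.toList = c :: tl)
    (hl : grammar.lookup (String.singleton c) = some ps) :
    treeCnt grammar (t + 1) p = 1 + (ps.map (treeCnt grammar t)).sum := by
  rw [treeCnt_succ, hnf]
  simp only [Bool.false_eq_true, if_false, hc]
  rw [hl]

-- fuel-indifference of the tree-size bound above the depth bound
theorem treeCnt_stable (grammar : List (String × List String))
    (hstab : ∀ k, dRank grammar grammar.length k = dRank grammar (grammar.length + 1) k)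
    (hall : grammar.all (fun kv => kv.2.all (okProd grammar)) = true) :
    ∀ (t : Nat) (p : String), okProd grammar p = true → muP grammar p ≤ t →
      ∀ n m, muP grammar p ≤ n → muP grammar p ≤ m →
        treeCnt grammar n p = treeCnt grammar m p := by
  intro t
  induction t with
  | zero => intro p _ hmt; have := muP_pos grammar p; omega
  | succ t ih =>
    intro p hok hmt n m hn hm
    have hp1 := muP_pos grammar p
    obtain ⟨n', rfl⟩ : ∃ n', n = n' + 1 := ⟨n - 1, by omega⟩
    obtain ⟨m', rfl⟩ : ∃ m', m = m' + 1 := ⟨m - 1, by omega⟩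
    rcases hf : flatB p with _ | _
    · obtain ⟨hdot, c, tl, ps, hc, hnt, hl⟩ := nonflat_shape grammar p hok hf
      rw [treeCnt_nonflat grammar n' p c tl ps hf hc hl,
          treeCnt_nonflat grammar m' p c tl ps hf hc hl]
      congr 1
      congr 1
      apply List.map_congr_left
      intro q hq
      have hokq := all_ok_mem grammar hall _ ps hl q hq
      have hlt := mu_lt grammar hstab p c tl ps q hc hf hl hq hokq
      have hmp : muP grammar p = dRank grammar grammar.length (String.singleton c) + 2 := by
        unfold muP; rw [hf, hc]; simp
      exact ih q hokq (by omega) n' m' (by omega) (by omega)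
    · rw [treeCnt_flat grammar n' p hf, treeCnt_flat grammar m' p hf]

theorem sizeP_nonflat (grammar : List (String × List String))
    (hstab : ∀ k, dRank grammar grammar.length k = dRank grammar (grammar.length + 1) k)
    (hall : grammar.all (fun kv => kv.2.all (okProd grammar)) = true)
    (p : String) (c : Char) (tl : List Char) (ps : List String)
    (hok : okProd grammar p = true) (hnf : flatB p = false)
    (hc : p.toList = c :: tl)
    (hl : grammar.lookup (String.singleton c) = some ps) :
    sizeP grammar p = 1 + (ps.map (sizeP grammar)).sum := by
  have hmp : muP grammar p = dRank grammar grammar.length (String.singleton c) + 2 := by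
    unfold muP; rw [hnf, hc]; simp
  unfold sizeP
  rw [hmp, treeCnt_nonflat grammar _ p c tl ps hnf hc hl]
  congr 1
  congr 1
  apply List.map_congr_left
  intro q hq
  have hokq := all_ok_mem grammar hall _ ps hl q hq
  have hlt := mu_lt grammar hstab p c tl ps q hc hnf hl hq hokq
  exact treeCnt_stable grammar hstab hall (muP grammar q) q hokq (le_refl _)
    _ _ (by omega) (le_refl _)

-- single-pop unfoldings of the stack loop
theorem checkStack_step_dot (n : Nat) (symbol p : String) (rest : List String)
    (grammar : List (String × List String)) (hdot : p.toList.contains '.' = true) :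
    checkStack (n + 1) symbol (p :: rest) grammar = true := by
  rw [checkStack_cons, hdot]
  simp

theorem checkStack_step_term (n : Nat) (symbol p : String) (rest : List String)
    (grammar : List (String × List String)) (c : Char) (tl : List Char)
    (hdot : p.toList.contains '.' = false) (hc : p.toList = c :: tl)
    (hterm : (65 ≤ c.toNat && c.toNat ≤ 90) = false) :
    checkStack (n + 1) symbol (p :: rest) grammar
      = (if (symbol == String.singleton c) = true then true
         else checkStack n symbol rest grammar) := by
  rw [checkStack_cons, hdot]
  simp [hc, hterm]

theorem checkStack_step_push (n : Nat) (symbol p : String) (rest : List String)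
    (grammar : List (String × List String)) (c : Char) (tl : List Char) (ps : List String)
    (hdot : p.toList.contains '.' = false) (hc : p.toList = c :: tl)
    (hnt : (65 ≤ c.toNat && c.toNat ≤ 90) = true)
    (hl : grammar.lookup (String.singleton c) = some ps) :
    checkStack (n + 1) symbol (p :: rest) grammar
      = checkStack n symbol (ps ++ rest) grammar := by
  rw [checkStack_cons, hdot]
  simp [hc, hnt, lookupG_eq_lookup, hl]

-- the stack search with enough fuel computes 'any' of A's recursion over the stack
theorem checkStack_eq (grammar : List (String × List String)) (symbol : String)
    (hstab : ∀ k, dRank grammar grammar.length k = dRank grammar (grammar.length + 1) k)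
    (hall : grammar.all (fun kv => kv.2.all (okProd grammar)) = true) :
    ∀ (n : Nat) (stack : List String), (∀ p ∈ stack, okProd grammar p = true) →
      ((stack.map (sizeP grammar)).sum ≤ n) →
      checkStack n symbol stack grammar = stack.any (recVal grammar symbol) := by
  intro n
  induction n with
  | zero =>
    intro stack hok hsz
    cases stack with
    | nil => rfl
    | cons p rest =>
      exfalso
      have h1 := treeCnt_pos grammar (muP grammar p) p
      simp only [List.map_cons, List.sum_cons] at hsz
      unfold sizeP at hsz
      omega
  | succ n ih =>
    intro stack hok hsz
    cases stack with
    | nil => rfl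
    | cons p rest =>
      have hokp : okProd grammar p = true := hok p (by simp)
      have hokr : ∀ q ∈ rest, okProd grammar q = true := fun q hq => hok q (by simp [hq])
      simp only [List.map_cons, List.sum_cons] at hsz
      have hszp : 1 ≤ sizeP grammar p := treeCnt_pos grammar (muP grammar p) p
      rw [List.any_cons]
      rcases hf : flatB p with _ | _
      · -- non-flat: push the productions of the head nonterminal
        obtain ⟨hdot, c, tl, ps, hc, hnt, hl⟩ := nonflat_shape grammar p hokp hf
        rw [checkStack_step_push n symbol p rest grammar c tl ps hdot hc hnt hl]
        have hsp := sizeP_nonflat grammar hstab hall p c tl ps hokp hf hc hl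
        have hokps := all_ok_mem grammar hall _ ps hl
        have hrec : checkStack n symbol (ps ++ rest) grammar
            = (ps ++ rest).any (recVal grammar symbol) := by
          apply ih
          · intro q hq
            rcases List.mem_append.mp hq with h | h
            · exact hokps q h
            · exact hokr q h
          · rw [List.map_append, List.sum_append]
            omega
        rw [hrec, List.any_append,
            recVal_nonflat grammar symbol hstab hall p c tl ps hokp hf hdot hc hnt hl]
      · -- flat production: evaluate directly
        have hev := recVal_flat grammar symbol p hf
        by_cases hcm : '.' ∈ p.toList
        · have hdot : p.toList.contains '.' = true := by simpa using hcm
          rw [checkStack_step_dot n symbol p rest grammar hdot]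
          have hrv : recVal grammar symbol p = true := by
            rw [hev]
            unfold evalFlat
            rw [hdot]
            simp
          simp [hrv]
        · have hdot : p.toList.contains '.' = false := by simpa using hcm
          unfold flatB at hf
          rw [hdot] at hf
          simp only [Bool.false_or] at hf
          unfold evalFlat at hev
          rw [hdot] at hev
          simp only [Bool.false_or] at hev
          cases hc : p.toList with
          | nil => rw [hc] at hf; simp at hf
          | cons c tl =>
            rw [hc] at hf hev
            simp only at hf hev
            have hterm : (65 ≤ c.toNat && c.toNat ≤ 90) = false := by
              rcases h90 : (65 ≤ c.toNat && c.toNat ≤ 90) with _ | _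
              · rfl
              · rw [h90] at hf; simp at hf
            rw [checkStack_step_term n symbol p rest grammar c tl hdot hc hterm]
            rcases hs : (symbol == String.singleton c) with _ | _
            · rw [hs] at hev
              rw [ih rest hokr (by omega)]
              simp [hev]
            · rw [hs] at hev
              simp [hev]

theorem muP_le (grammar : List (String × List String)) (p : String) :
    muP grammar p ≤ grammar.length + 2 := by
  unfold muP
  rcases hf : flatB p with _ | _
  · simp only [Bool.false_eq_true, if_false]
    cases hc : p.toList with
    | nil => simp only; omega
    | cons c tl =>
      simp only
      have := dRank_le grammar grammar.length (String.singleton c)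
      omega
  · simp only [if_true]
    omega

-- bFuel bounds and monotonicity
theorem bFuel_succ_ge (grammar : List (String × List String)) (t : Nat) :
    bFuel grammar t ≤ bFuel grammar (t + 1) := by
  induction t with
  | zero => simp [bFuel]
  | succ t ih =>
    show 1 + gsize grammar * bFuel grammar t ≤ 1 + gsize grammar * bFuel grammar (t + 1)
    have := Nat.mul_le_mul_left (gsize grammar) ih
    omega

theorem bFuel_mono (grammar : List (String × List String)) (a b : Nat) (h : a ≤ b) :
    bFuel grammar a ≤ bFuel grammar b := by
  induction b with
  | zero =>
    have ha : a = 0 := by omega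
    subst ha
    exact le_refl _
  | succ b ih =>
    rcases Nat.lt_or_ge a (b + 1) with hl | hg
    · exact le_trans (ih (by omega)) (bFuel_succ_ge grammar b)
    · have : a = b + 1 := by omega
      subst this
      exact le_refl _

theorem sum_map_le (l : List String) (f : String → Nat) (b : Nat)
    (h : ∀ x ∈ l, f x ≤ b) : (l.map f).sum ≤ l.length * b := by
  induction l with
  | nil => simp
  | cons x xs ih =>
    simp only [List.map_cons, List.sum_cons, List.length_cons]
    have h1 := h x (by simp)
    have h2 := ih (fun y hy => h y (by simp [hy]))
    have : (xs.length + 1) * b = xs.length * b + b := by ring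
    omega

theorem gsize_foldl (grammar : List (String × List String)) (acc : Nat) :
    grammar.foldl (fun a kv => a + kv.2.length) acc
      = acc + grammar.foldl (fun a kv => a + kv.2.length) 0 := by
  induction grammar generalizing acc with
  | nil => simp
  | cons kv rest ih =>
    simp only [List.foldl_cons]
    rw [ih (acc + kv.2.length), ih (0 + kv.2.length)]
    omega

theorem lookup_len_le_gsize (grammar : List (String × List String)) (k : String)
    (ps : List String) (h : grammar.lookup k = some ps) : ps.length ≤ gsize grammar := by
  have hm : (k, ps) ∈ grammar := lookup_mem grammar k ps h
  clear h
  induction grammar with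
  | nil => simp at hm
  | cons kv rest ih =>
    unfold gsize
    simp only [List.foldl_cons]
    rw [gsize_foldl]
    rcases List.mem_cons.mp hm with h | h
    · subst h
      simp only
      omega
    · have := ih h
      unfold gsize at this
      omega

theorem treeCnt_le_bFuel (grammar : List (String × List String)) :
    ∀ (t : Nat) (p : String), treeCnt grammar t p ≤ bFuel grammar t := by
  intro t
  induction t with
  | zero => intro p; simp [treeCnt, bFuel]
  | succ t ih =>
    intro p
    rw [treeCnt_succ]
    show _ ≤ 1 + gsize grammar * bFuel grammar t
    split
    · have := treeCnt_pos grammar t p; omega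
    · split
      · omega
      · rename_i c tl heq
        cases hl : grammar.lookup (String.singleton c) with
        | none => simp
        | some ps =>
          simp only
          have h1 := sum_map_le ps (treeCnt grammar t) (bFuel grammar t) (fun q _ => ih q)
          have h2 := lookup_len_le_gsize grammar (String.singleton c) ps hl
          have h3 := Nat.mul_le_mul h2 (Nat.le_refl (bFuel grammar t))
          omega

-- ===== VERDICT (by name: the statement is the Claim_ definition above) =====
theorem check_spec : Claim_equal_check := by
  intro symbol production grammar _ hpre
  unfold Spec_check check check_alt
  unfold Pre_check at hpre
  simp only [Bool.and_eq_true] at hpre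
  obtain ⟨⟨hokp, hall⟩, hstabb⟩ := hpre
  have hstab := pre_hstab grammar hstabb
  -- A's port with its fixed fuel computes recVal
  have hA : checkFuel (grammar.length + 3) symbol production grammar
      = recVal grammar symbol production := by
    have hle := muP_le grammar production
    exact checkFuel_stable grammar symbol hstab hall (muP grammar production) production hokp
      (le_refl _) _ _ (by omega) (le_refl _)
  -- B's port with its fixed fuel computes recVal as well
  have hB : checkStack (bFuel grammar (grammar.length + 2)) symbol [production] grammar
      = recVal grammar symbol production := by
    have h1 : sizeP grammar production ≤ bFuel grammar (grammar.length + 2) := by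
      have h2 := treeCnt_le_bFuel grammar (muP grammar production) production
      have h3 := bFuel_mono grammar (muP grammar production) (grammar.length + 2)
        (muP_le grammar production)
      unfold sizeP
      omega
    have := checkStack_eq grammar symbol hstab hall
      (bFuel grammar (grammar.length + 2)) [production]
      (fun p hp => by rw [List.mem_singleton.mp hp]; exact hokp)
      (by simpa using h1)
    rw [this]
    simp
  rw [hA, hB]
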